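-- pv_equiv track=rewrite | github.com/ISCAcoordinator/isca-archive-analysis | src/isca_archive/analyze/common/author.py | gimme_max
-- ===== SOURCE A (Python) =====
-- def gimme_max(the_dict: dict[str, list[str]]) -> set[str]:
-- 	max_key = set()
-- 	max_length = -1
--
-- 	for key, value in the_dict.items():
-- 		if len(value) > max_length:
-- 			max_length = len(value)
-- 			max_key = set([key])
-- 		elif len(value) == max_length:
-- 			max_key.add(key)
-- 	return max_key
-- ===== SOURCE B (Python) =====
-- def gimme_max(the_dict: dict[str, list[str]]) -> set[str]:
--     if not the_dict:
--         return set()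
--     max_len = max(len(v) for v in the_dict.values())
--     return {k for k, v in the_dict.items() if len(v) == max_len}
-- ===== Notes on version B (the rewrite author's own statement) =====
-- stated objective: simpler
-- what changed: Replaces the single running-max-with-tie-reset loop over a mutable (set, max_length) state by a two-pass decomposition: compute the maximum value-list length with max(), then return a set comprehension filtering the keys that attain it.
import Mathlib
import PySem

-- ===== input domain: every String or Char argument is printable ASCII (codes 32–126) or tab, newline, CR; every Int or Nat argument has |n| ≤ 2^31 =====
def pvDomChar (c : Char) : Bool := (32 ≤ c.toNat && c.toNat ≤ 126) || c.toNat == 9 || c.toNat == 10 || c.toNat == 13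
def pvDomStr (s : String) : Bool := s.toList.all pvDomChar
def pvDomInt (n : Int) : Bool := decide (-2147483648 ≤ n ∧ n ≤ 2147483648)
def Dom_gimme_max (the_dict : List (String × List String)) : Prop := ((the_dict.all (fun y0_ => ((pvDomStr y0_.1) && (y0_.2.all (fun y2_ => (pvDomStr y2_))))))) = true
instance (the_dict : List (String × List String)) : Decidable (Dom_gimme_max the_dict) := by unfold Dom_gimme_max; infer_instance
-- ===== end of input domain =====

-- ===== PORT A =====
-- B is a simpler two-pass decomposition (max length, then filter) replacing A's running-max loop; no speed claim.
def gimme_maxGo : List (String × List String) → List String → Int → List String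
  | [], s, _ => s
  | (k, v) :: t, s, m =>
    if (v.length : Int) > m then gimme_maxGo t [k] (v.length : Int)
    else if (v.length : Int) = m then gimme_maxGo t (PySem.Set.add s k) m
    else gimme_maxGo t s m

def gimme_max (the_dict : List (String × List String)) : List String :=
  gimme_maxGo the_dict [] (-1)

-- ===== PORT B =====
def gimme_max_alt (the_dict : List (String × List String)) : List String :=
  match the_dict with
  | [] => []
  | (k, v) :: t =>
    -- max(len(v) for v in the_dict.values()) as a fold of max over the remaining lengths
    let maxLen : Int := t.foldl (fun a p => max a (p.2.length : Int)) (v.length : Int)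
    PySem.Set.ofList ((((k, v) :: t).filter (fun p => (p.2.length : Int) == maxLen)).map Prod.fst)

-- ===== PRECONDITION & SPEC =====
-- Pre_ requires distinct keys: a Python dict cannot contain duplicate keys, so association
-- lists with repeated keys do not represent any input A accepts; nothing A returns on is excluded.
def Pre_gimme_max (the_dict : List (String × List String)) : Prop :=
  (the_dict.map Prod.fst).Nodup
instance (the_dict : List (String × List String)) : Decidable (Pre_gimme_max the_dict) := by
  unfold Pre_gimme_max; infer_instance
def pvWitness_gimme_max : (List (String × List String)) := [("a", ["x"]), ("b", [])]
def Spec_gimme_max (the_dict : List (String × List String)) (out : List String) : Prop := out = gimme_max_alt the_dict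
instance (the_dict : List (String × List String)) (out : List String) : Decidable (Spec_gimme_max the_dict out) := by unfold Spec_gimme_max; infer_instance

-- ===== CLAIM (what is proved, stated in full; the proofs are below) =====
def Claim_equal_gimme_max : Prop := ∀ (the_dict : List (String × List String)), Dom_gimme_max the_dict → Pre_gimme_max the_dict → Spec_gimme_max the_dict (gimme_max the_dict)

-- ===== LEMMAS AND PROOFS =====

lemma le_foldl_max (t : List (String × List String)) (m : Int) :
    m ≤ t.foldl (fun a p => max a (p.2.length : Int)) m := by
  induction t generalizing m with
  | nil => simp
  | cons hd tl ih =>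
    simp only [List.foldl_cons]
    exact le_trans (le_max_left _ _) (ih _)

lemma set_add_of_not_mem (s : List String) (k : String) (h : k ∉ s) :
    PySem.Set.add s k = s ++ [k] := by
  simp [PySem.Set.add, PySem.Set.contains, h]

lemma goA_eq (t : List (String × List String)) (s : List String) (m : Int)
    (hnd : (t.map Prod.fst).Nodup) (hdisj : ∀ p ∈ t, p.1 ∉ s) :
    gimme_maxGo t s m =
      (if t.foldl (fun a p => max a (p.2.length : Int)) m = m then s else []) ++
        (t.filter (fun p => (p.2.length : Int) == t.foldl (fun a p => max a (p.2.length : Int)) m)).map Prod.fst := by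
  induction t generalizing s m with
  | nil => simp [gimme_maxGo]
  | cons hd tl ih =>
    obtain ⟨k, v⟩ := hd
    simp only [List.map_cons, List.nodup_cons, List.mem_map] at hnd
    have hknd : ∀ p ∈ tl, p.1 ≠ k := by
      intro p hp hpk
      exact hnd.1 ⟨p, hp, hpk⟩
    have hM := le_foldl_max tl
    simp only [List.foldl_cons, gimme_maxGo]
    by_cases h1 : (v.length : Int) > m
    · have hmax : max m (v.length : Int) = (v.length : Int) := max_eq_right (le_of_lt h1)
      rw [if_pos h1]
      simp only [hmax]
      rw [ih [k] (v.length : Int) hnd.2 (by intro p hp; simp [hknd p hp])]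
      set M := tl.foldl (fun a p => max a (p.2.length : Int)) (v.length : Int) with hMdef
      have hMm : M ≠ m := by have := hM (v.length : Int); omega
      rw [if_neg hMm]
      simp only [List.filter_cons, List.nil_append]
      by_cases h2 : (v.length : Int) = M
      · rw [if_pos (le_antisymm (hM _) (le_of_eq h2.symm) ▸ rfl : M = (v.length : Int))]
        simp [h2]
      · have : M ≠ (v.length : Int) := fun h => h2 h.symm
        rw [if_neg this]
        simp [h2]
    · rw [if_neg h1]
      have hmax : max m (v.length : Int) = m := max_eq_left (by omega)
      simp only [hmax]
      by_cases h2 : (v.length : Int) = m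
      · rw [if_pos h2]
        have hk : k ∉ s := hdisj (k, v) (by simp)
        rw [set_add_of_not_mem s k hk]
        rw [ih (s ++ [k]) m hnd.2 (by
          intro p hp
          simp only [List.mem_append, List.mem_singleton]
          rintro (h | h)
          · exact hdisj p (List.mem_cons_of_mem _ hp) h
          · exact hknd p hp h)]
        set M := tl.foldl (fun a p => max a (p.2.length : Int)) m with hMdef
        simp only [List.filter_cons]
        by_cases h3 : M = m
        · rw [if_pos h3, if_pos h3]
          have : ((v.length : Int) == M) = true := by simp [h2, h3]
          rw [this]
          simp
        · rw [if_neg h3, if_neg h3]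
          have : ((v.length : Int) == M) = false := by
            simp only [beq_eq_false_iff_ne, ne_eq]
            intro h; exact h3 (h ▸ h2.symm ▸ rfl)
          rw [this]
          simp
      · rw [if_neg h2]
        rw [ih s m hnd.2 (fun p hp => hdisj p (List.mem_cons_of_mem _ hp))]
        set M := tl.foldl (fun a p => max a (p.2.length : Int)) m with hMdef
        simp only [List.filter_cons]
        have : ((v.length : Int) == M) = false := by
          simp only [beq_eq_false_iff_ne, ne_eq]
          have := hM m
          omega
        rw [this]
        simp

-- ===== VERDICT (by name: the statement is the Claim_ definition above) =====
theorem gimme_max_spec : Claim_equal_gimme_max := by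
  intro d _ hpre
  unfold Spec_gimme_max gimme_max gimme_max_alt
  unfold Pre_gimme_max at hpre
  match d with
  | [] => rfl
  | (k, v) :: t =>
    simp only [List.map_cons, List.nodup_cons, List.mem_map] at hpre
    have hknd : ∀ p ∈ t, p.1 ≠ k := fun p hp hpk => hpre.1 ⟨p, hp, hpk⟩
    simp only [gimme_maxGo]
    have h1 : (v.length : Int) > (-1 : Int) := by omega
    rw [if_pos h1]
    rw [goA_eq t [k] (v.length : Int) hpre.2 (by intro p hp; simp [hknd p hp])]
    set M := t.foldl (fun a p => max a (p.2.length : Int)) (v.length : Int) with hMdef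
    have hnodup : ((((k, v) :: t).filter (fun p => (p.2.length : Int) == M)).map Prod.fst).Nodup := by
      have hsub : List.Sublist ((((k, v) :: t).filter (fun p => (p.2.length : Int) == M)).map Prod.fst)
          (((k, v) :: t).map Prod.fst) := List.Sublist.map Prod.fst List.filter_sublist
      have hall : (((k, v) :: t).map Prod.fst).Nodup := List.nodup_cons.mpr ⟨fun h => by
        obtain ⟨p, hp, hpk⟩ := List.mem_map.mp h
        exact hknd p hp hpk, hpre.2⟩
      exact hall.sublist hsub
    rw [PySem.Set.ofList_eq_self_of_nodup _ hnodup]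
    simp only [List.filter_cons]
    have hM := le_foldl_max t (v.length : Int)
    by_cases h2 : M = (v.length : Int)
    · rw [if_pos h2]
      have : ((v.length : Int) == M) = true := by simp [h2]
      rw [this]
      simp
    · rw [if_neg h2]
      have : ((v.length : Int) == M) = false := by
        simp only [beq_eq_false_iff_ne, ne_eq]
        exact fun h => h2 h.symm
      rw [this]
      simp
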